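-- pv_equiv track=rewrite | github.com/pedrovictorgf/ia-2019-1 | first_project/best_first_search.py | insert_priority_queue
-- ===== SOURCE A (Python) =====
-- h = {
--     "Arad": 366,
--     "Bucharest": 0,
--     "Craiova": 160,
--     "Dobreta": 242,
--     "Eforie": 161,
--     "Fagaras": 176,
--     "Giurgiu": 77,
--     "Hirsova": 151,
--     "Iasi": 226,
--     "Lugoj": 244,
--     "Mehadia": 241,
--     "Neamt": 234,
--     "Oradea": 380,
--     "Pitesti": 100,
--     "Rimnicu_Vilcea": 193,
--     "Sibiu": 253,
--     "Timisoara": 329,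
--     "Urziceni": 80,
--     "Vaslui": 199,
--     "Zerind": 374
-- }
--
-- def insert_priority_queue(queue, element):
--     size = len(queue)
--     if size > 0:
--         for i in range(size):
--             if h[element[-1][0]] < h[queue[i][-1][0]]:
--                 return queue[:i] + [element] + queue[i:]
--             elif i == size - 1:
--                 return queue + [element]
--     else:
--         return [element]
-- ===== SOURCE B (Python) =====
-- h = {
--     "Arad": 366,
--     "Bucharest": 0,
--     "Craiova": 160,
--     "Dobreta": 242,
--     "Eforie": 161,
--     "Fagaras": 176,
--     "Giurgiu": 77,
--     "Hirsova": 151,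
--     "Iasi": 226,
--     "Lugoj": 244,
--     "Mehadia": 241,
--     "Neamt": 234,
--     "Oradea": 380,
--     "Pitesti": 100,
--     "Rimnicu_Vilcea": 193,
--     "Sibiu": 253,
--     "Timisoara": 329,
--     "Urziceni": 80,
--     "Vaslui": 199,
--     "Zerind": 374
-- }
--
-- def insert_priority_queue(queue, element):
--     # Guard the empty queue first: A returns [element] there without touching h.
--     if not queue:
--         return [element]
--     key = h[element[-1][0]]
--     prefix = []
--     it = iter(queue)
--     for path in it:
--         if key < h[path[-1][0]]:
--             # first strictly-greater entry found: splice and stop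
--             return prefix + [element, path] + list(it)
--         prefix.append(path)
--     return prefix + [element]
-- ===== Notes on version B (the rewrite author's own statement) =====
-- stated objective: idiomatic
-- what changed: Replaced A's range-index loop with its slicing reconstruction and special 'elif i == size - 1' last-index case by an empty-queue guard followed by a single accumulator-plus-iterator pass that splices the element before the first strictly greater-keyed path.
import Mathlib
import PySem

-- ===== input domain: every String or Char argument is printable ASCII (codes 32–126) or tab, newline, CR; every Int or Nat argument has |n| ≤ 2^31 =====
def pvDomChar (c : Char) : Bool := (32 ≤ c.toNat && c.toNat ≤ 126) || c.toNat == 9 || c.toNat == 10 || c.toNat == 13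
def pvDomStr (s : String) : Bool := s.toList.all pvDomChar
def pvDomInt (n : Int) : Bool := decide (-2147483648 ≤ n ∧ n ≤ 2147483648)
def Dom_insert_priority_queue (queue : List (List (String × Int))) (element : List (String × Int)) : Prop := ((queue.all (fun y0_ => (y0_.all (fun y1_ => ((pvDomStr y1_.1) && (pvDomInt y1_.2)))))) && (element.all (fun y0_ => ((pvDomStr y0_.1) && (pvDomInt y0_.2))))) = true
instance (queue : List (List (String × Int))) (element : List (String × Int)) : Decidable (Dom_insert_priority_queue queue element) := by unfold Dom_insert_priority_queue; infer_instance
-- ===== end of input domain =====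

-- B replaces A's index loop with slicing and a last-index elif by an empty-queue guard plus a single
-- accumulator/iterator pass (objective: idiomatic/alternative, no speed claim; neither version mutates its arguments).

-- the module-level dict h, shared by both Pythons
def hDict : PySem.Dict String Int := PySem.Dict.ofList
  [("Arad", 366), ("Bucharest", 0), ("Craiova", 160), ("Dobreta", 242), ("Eforie", 161),
   ("Fagaras", 176), ("Giurgiu", 77), ("Hirsova", 151), ("Iasi", 226), ("Lugoj", 244),
   ("Mehadia", 241), ("Neamt", 234), ("Oradea", 380), ("Pitesti", 100), ("Rimnicu_Vilcea", 193),
   ("Sibiu", 253), ("Timisoara", 329), ("Urziceni", 80), ("Vaslui", 199), ("Zerind", 374)]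

-- h[p[-1][0]]; the default 0 is only reached outside Pre_ (where the Python raises)
def pathKey (p : List (String × Int)) : Int :=
  match PySem.List.pyGet? p (-1) with
  | some pr => (PySem.Dict.get? hDict pr.1).getD 0
  | none => 0

-- ===== PORT A =====
-- the 'for i in range(size)' loop with its early returns (i is the loop index, 0 ≤ i < queue.length)
def ipqLoop (queue : List (List (String × Int))) (element : List (String × Int)) (i : Nat) : List (List (String × Int)) :=
  if hi : i < queue.length then
    if pathKey element < pathKey queue[i] then
      queue.take i ++ [element] ++ queue.drop i
    else if i = queue.length - 1 then
      queue ++ [element]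
    else
      ipqLoop queue element (i + 1)
  else []  -- unreachable: the loop always returns before i reaches size
termination_by queue.length - i

def insert_priority_queue (queue : List (List (String × Int))) (element : List (String × Int)) : List (List (String × Int)) :=
  if queue.length > 0 then ipqLoop queue element 0 else [element]

-- ===== PORT B =====
-- B's for-loop over the iterator: 'prefix' is the accumulator, the cons-tail is what remains of 'it'
def altLoop (element : List (String × Int)) (key : Int) (pre : List (List (String × Int))) :
    List (List (String × Int)) → List (List (String × Int))
  | [] => pre ++ [element]
  | path :: rest =>
    if key < pathKey path then pre ++ [element, path] ++ rest
    else altLoop element key (pre ++ [path]) rest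

def insert_priority_queue_alt (queue : List (List (String × Int))) (element : List (String × Int)) : List (List (String × Int)) :=
  if queue.isEmpty then [element]
  else altLoop element (pathKey element) [] queue

-- ===== PRECONDITION & SPEC =====
def pvGoodPath (p : List (String × Int)) : Bool :=
  match p.getLast? with
  | some pr => (PySem.Dict.get? hDict pr.1).isSome
  | none => false

-- Pre_ excludes inputs where a nonempty queue holds an empty path or a city absent from h (or the element does):
-- there the Python A raises KeyError/IndexError on every path it inspects; on such inputs placed after the
-- insertion point A happens to return without inspecting them, and B returns the same list (see cites).
def Pre_insert_priority_queue (queue : List (List (String × Int))) (element : List (String × Int)) : Prop :=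
  queue = [] ∨ (pvGoodPath element = true ∧ ∀ q ∈ queue, pvGoodPath q = true)
instance (queue : List (List (String × Int))) (element : List (String × Int)) : Decidable (Pre_insert_priority_queue queue element) := by unfold Pre_insert_priority_queue; infer_instance

def pvWitness_insert_priority_queue : (List (List (String × Int))) × (List (String × Int)) :=
  ([[("Arad", 1)], [("Sibiu", 2)]], [("Bucharest", 0)])

def Spec_insert_priority_queue (queue : List (List (String × Int))) (element : List (String × Int)) (out : List (List (String × Int))) : Prop := out = insert_priority_queue_alt queue element
instance (queue : List (List (String × Int))) (element : List (String × Int)) (out : List (List (String × Int))) : Decidable (Spec_insert_priority_queue queue element out) := by unfold Spec_insert_priority_queue; infer_instance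

-- ===== CLAIM (what is proved, stated in full; the proofs are below) =====
def Claim_equal_insert_priority_queue : Prop := ∀ (queue : List (List (String × Int))) (element : List (String × Int)), Dom_insert_priority_queue queue element → Pre_insert_priority_queue queue element → Spec_insert_priority_queue queue element (insert_priority_queue queue element)

-- ===== LEMMAS AND PROOFS =====

-- common reference shape both loops reduce to: insert before the first strictly larger key
def pvIns (key : Int) (element : List (String × Int)) : List (List (String × Int)) → List (List (String × Int))
  | [] => [element]
  | q :: rest => if key < pathKey q then element :: q :: rest else q :: pvIns key element rest

theorem altLoop_eq (element : List (String × Int)) (key : Int) :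
    ∀ (qs pre : List (List (String × Int))), altLoop element key pre qs = pre ++ pvIns key element qs := by
  intro qs
  induction qs with
  | nil => intro pre; simp [altLoop, pvIns]
  | cons q rest ih =>
    intro pre
    by_cases h : key < pathKey q
    · simp [altLoop, pvIns, h]
    · simp [altLoop, pvIns, h, ih]

theorem ipqLoop_eq (queue : List (List (String × Int))) (element : List (String × Int)) :
    ∀ i, i < queue.length →
      ipqLoop queue element i = queue.take i ++ pvIns (pathKey element) element (queue.drop i) := by
  intro i hi
  induction hn : queue.length - i generalizing i with
  | zero => omega
  | succ n ih =>
    unfold ipqLoop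
    rw [dif_pos hi, List.drop_eq_getElem_cons hi]
    by_cases h1 : pathKey element < pathKey queue[i]
    · simp [h1, pvIns]
    · by_cases h2 : i = queue.length - 1
      · have hdrop : queue.drop (i + 1) = [] := List.drop_eq_nil_of_le (by omega)
        rw [if_neg h1, if_pos h2, hdrop]
        simp only [pvIns, if_neg h1]
        have h3 : queue.take (i + 1) = queue := List.take_of_length_le (by omega)
        conv_lhs => rw [← h3]
        rw [List.take_add_one, List.getElem?_eq_getElem hi]
        simp only [Option.toList_some, List.append_assoc, List.cons_append, List.nil_append]
      · have hi1 : i + 1 < queue.length := by omega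
        rw [if_neg h1, if_neg h2, ih (i + 1) hi1 (by omega)]
        simp only [pvIns, if_neg h1]
        rw [List.take_add_one, List.getElem?_eq_getElem hi]
        simp only [Option.toList_some, List.append_assoc, List.cons_append, List.nil_append]

-- ===== VERDICT (by name: the statement is the Claim_ definition above) =====
theorem insert_priority_queue_spec : Claim_equal_insert_priority_queue := by
  intro queue element _ _
  unfold Spec_insert_priority_queue insert_priority_queue insert_priority_queue_alt
  cases queue with
  | nil => simp
  | cons q qs =>
    rw [if_pos (by simp), if_neg (by simp)]
    rw [ipqLoop_eq (q :: qs) element 0 (by simp), altLoop_eq]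
    simp
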